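-- pv_equiv track=rewrite | github.com/k-ranasinghe/RPAL-Interpreter | AST.py | Build_Preorder_Tree
-- ===== SOURCE A (Python) =====
-- def Build_Preorder_Tree(AST):
--     # Create a copy of the AST and reverse it to obtain a postorder traversal
--     Postorder_AST = AST.copy()
--     Postorder_AST.reverse()
--
--     # Initialize the preorder AST with a list containing None
--     Preorder_AST = [None]
--     i = 0
--     depth = 0
--     # Traverse the postorder AST to build the preorder AST
--     for node in Postorder_AST:
--         num_child = node[1]
--         node_val = node[0]
--
--         # Add the node value with appropriate indentation to the preorder AST
--         Preorder_AST[i] = "." * depth + node_val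
--         depth += 1
--         # Insert None values for the children of the current node
--         for j in range(num_child):
--             i += 1
--             Preorder_AST.insert(i, None)
--
--         # Adjust depth and index if the current node has no children
--         if num_child == 0:
--             depth -= 1
--             i -= 1
--             while Preorder_AST[i] != None and i > -1:
--                 depth -= 1
--                 i -= 1
--     return Preorder_AST
-- ===== SOURCE B (Python) =====
-- def Build_Preorder_Tree(AST):
--     # Rebuild the tree from the child-count-annotated postorder listing with a
--     # single forward stack pass: each entry claims its declared children from
--     # the top of the stack (a truncated listing may supply fewer than declared),
--     # then emit the dot-indented preorder listing by recursion, appending to the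
--     # output; a declared but never-supplied child is an empty (None) cell.
--     stack = []
--     for val, num_child in AST:
--         split = max(len(stack) - num_child, 0)
--         stack, children = stack[:split], stack[split:]
--         stack.append((val, num_child, children))
--     out = []
--     def emit(node, depth):
--         val, num_child, children = node
--         out.append("." * depth + val)
--         for _ in range(num_child - len(children)):
--             out.append(None)
--         for child in children:
--             emit(child, depth + 1)
--     if stack:
--         emit(stack[-1], 0)
--     else:
--         out.append(None)  # an empty listing has no root: one empty cell
--     return out
-- ===== Notes on version B (the rewrite author's own statement) =====
-- stated objective: faster
-- what changed: Replaced the reversed-order slot-filling loop (mid-list insert of None placeholders plus a backward while-walk to the next open slot) by a forward stack parse of the postorder listing followed by a recursive append-only preorder emission; Pre_ excludes malformed listings with a negative child count after the first entry or a non-final entry that closes the tree early, on which A raises IndexError or silently overwrites and drops already-placed nodes through stale or negative indices.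
-- outside the precondition, e.g. on Build_Preorder_Tree([('x', 0), ('y', -1)]): A returns ['.x'], B returns ['y']; on Build_Preorder_Tree([('a', 0), ('b', 0), ('c', 1)]): A returns ['c', 'a'], B returns ['c', '.b']
import Mathlib
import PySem

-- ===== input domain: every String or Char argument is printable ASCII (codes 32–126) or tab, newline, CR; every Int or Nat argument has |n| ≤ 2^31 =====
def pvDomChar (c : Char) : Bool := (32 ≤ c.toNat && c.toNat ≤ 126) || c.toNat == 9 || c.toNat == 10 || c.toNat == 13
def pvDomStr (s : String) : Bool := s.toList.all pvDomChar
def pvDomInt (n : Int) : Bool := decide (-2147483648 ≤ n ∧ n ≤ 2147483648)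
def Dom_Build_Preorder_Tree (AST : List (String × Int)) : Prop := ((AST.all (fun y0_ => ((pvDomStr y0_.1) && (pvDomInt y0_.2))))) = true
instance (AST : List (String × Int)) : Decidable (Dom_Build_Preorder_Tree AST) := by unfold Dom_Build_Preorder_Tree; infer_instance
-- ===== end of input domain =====

-- B rebuilds the tree from the postorder listing with one forward stack pass and emits the
-- indented preorder listing append-only, instead of A's reversed-order slot filling with
-- mid-list None insertions and a backward while-walk.

-- ===== PORT A =====

-- '"." * depth + node_val' ('"." * d' is "" for d < 0, which toNat matches exactly)
def pvDots (d : Int) (v : String) : Option String :=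
  some (String.ofList (List.replicate d.toNat '.' ++ v.toList))

-- Python 'L[i] = x' (negative index counts from the end; on out-of-range Python raises
-- IndexError — unreachable under Pre_ — here L is returned unchanged)
def pvSet (L : List (Option String)) (i : Int) (x : Option String) : List (Option String) :=
  let j : Int := if i < 0 then i + L.length else i
  if 0 ≤ j ∧ j < L.length then L.set j.toNat x else L

-- 'for j in range(num_child): i += 1; Preorder_AST.insert(i, None)'
def pvInsertNones (L : List (Option String)) (i c : Int) : List (Option String) × Int :=
  (PySem.List.pyRange 0 c).foldl (fun p _ => (PySem.List.insert p.1 (p.2 + 1) none, p.2 + 1)) (L, i)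

-- 'while Preorder_AST[i] != None and i > -1: depth -= 1; i -= 1'
-- (exact while -1 ≤ i and the index is in range, which holds throughout under Pre_;
--  Python evaluates L[i] first and would raise IndexError for i ≤ -len(L)-1)
def pvWalk (L : List (Option String)) (i d : Int) : Int × Int :=
  if h : -1 < i ∧ PySem.List.pyGet? L i ≠ some none then pvWalk L (i - 1) (d - 1) else (i, d)
  termination_by (i + 1).toNat
  decreasing_by omega

-- the main 'for node in Postorder_AST' loop, state (Preorder_AST, i, depth)
def pvALoop : List (String × Int) → List (Option String) → Int → Int → List (Option String)
  | [], L, _, _ => L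
  | (v, c) :: rest, L, i, depth =>
      let L1 := pvSet L i (pvDots depth v)
      let s2 := pvInsertNones L1 i c
      let depth2 := depth + 1
      if c == 0 then
        let w := pvWalk s2.1 (s2.2 - 1) (depth2 - 1)
        pvALoop rest s2.1 w.1 w.2
      else
        pvALoop rest s2.1 s2.2 depth2

def Build_Preorder_Tree (AST : List (String × Int)) : List (Option String) :=
  pvALoop AST.reverse [none] 0 0

-- ===== PORT B =====

-- Source B's nodes: tuples (val, num_child, children) (explicit child-list type, no nested inductive)
mutual
inductive HTree : Type where
  | node : String → Int → HTreeList → HTree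
inductive HTreeList : Type where
  | nil : HTreeList
  | cons : HTree → HTreeList → HTreeList
end

def pvOfList : List HTree → HTreeList
  | [] => .nil
  | t :: ts => .cons t (pvOfList ts)

-- 'len(children)'
def pvLenN : HTreeList → Nat
  | .nil => 0
  | .cons _ ts => pvLenN ts + 1

-- one iteration of Source B's loop: the entry claims its declared children from the stack top
def pvBStep (stack : List HTree) (p : String × Int) : List HTree :=
  let split : Int := max ((stack.length : Int) - p.2) 0
  let kept := PySem.List.slice stack none (some split)
  let children := PySem.List.slice stack (some split) none
  kept ++ [HTree.node p.1 p.2 (pvOfList children)]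

mutual
-- 'emit(node, depth)' of Source B, returning the emitted segment instead of mutating 'out'
def pvEmit : HTree → Int → List (Option String)
  | .node v c cs, d =>
      pvDots d v :: (List.replicate (c - (pvLenN cs : Int)).toNat none ++ pvEmitL cs (d + 1))
def pvEmitL : HTreeList → Int → List (Option String)
  | .nil, _ => []
  | .cons t ts, d => pvEmit t d ++ pvEmitL ts d
end

def Build_Preorder_Tree_alt (AST : List (String × Int)) : List (Option String) :=
  let stack := AST.foldl pvBStep []
  match stack.getLast? with   -- 'if stack: emit(stack[-1], 0) else: out.append(None)'
  | some t => pvEmit t 0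
  | none => [none]

-- ===== PRECONDITION & SPEC =====

-- running balance of a segment: each entry pushes one node and pops its declared children
def pvOnes (AST : List (String × Int)) : Int := (AST.map (fun p => 1 - p.2)).sum

-- Pre_ restricts to the task's natural domain: a (possibly empty or truncated)
-- postorder-with-arities listing of one tree — every child count after the first entry
-- nonnegative (the first entry is always a childless leaf, so any nonpositive count there
-- is harmless), and no proper suffix closes the tree early (balance of every proper suffix
-- ≤ 0).  Excluded are malformed listings, on which A raises IndexError or silently
-- overwrites and drops already-placed nodes through stale or negative indices.
def Pre_Build_Preorder_Tree (AST : List (String × Int)) : Prop :=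
  (∀ p ∈ AST.drop 1, 0 ≤ p.2) ∧
  (∀ j : Nat, j < AST.length → 1 ≤ j → pvOnes (AST.drop j) ≤ 0)

instance (AST : List (String × Int)) : Decidable (Pre_Build_Preorder_Tree AST) := by
  unfold Pre_Build_Preorder_Tree; infer_instance

def pvWitness_Build_Preorder_Tree : (List (String × Int)) :=
  [("d", 0), ("c", 1), ("b", 0), ("a", 2)]

def Spec_Build_Preorder_Tree (AST : List (String × Int)) (out : List (Option String)) : Prop := out = Build_Preorder_Tree_alt AST
instance (AST : List (String × Int)) (out : List (Option String)) : Decidable (Spec_Build_Preorder_Tree AST out) := by unfold Spec_Build_Preorder_Tree; infer_instance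

-- ===== CLAIM (what is proved, stated in full; the proofs are below) =====
def Claim_equal_Build_Preorder_Tree : Prop := ∀ (AST : List (String × Int)), Dom_Build_Preorder_Tree AST → Pre_Build_Preorder_Tree AST → Spec_Build_Preorder_Tree AST (Build_Preorder_Tree AST)

-- ===== LEMMAS AND PROOFS =====

-- postorder-with-arities of a tree / forest: the input format both ports consume
mutual
def pvPostH : HTree → List (String × Int)
  | .node v c cs => pvPostHL cs ++ [(v, c)]
def pvPostHL : HTreeList → List (String × Int)
  | .nil => []
  | .cons t ts => pvPostH t ++ pvPostHL ts
end

def pvToList : HTreeList → List HTree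
  | .nil => []
  | .cons t ts => t :: pvToList ts

-- complete trees: the declared count equals the number of supplied children, recursively
mutual
def pvComplete : HTree → Prop
  | .node _ c cs => c = (pvLenN cs : Int) ∧ pvCompleteL cs
def pvCompleteL : HTreeList → Prop
  | .nil => True
  | .cons t ts => pvComplete t ∧ pvCompleteL ts
end

-- partial trees: what B's clamped stack pass builds — the leftmost supplied child may
-- itself be partial, the others are complete, and missing children are allowed (count ≥
-- number supplied)
def pvPartial : HTree → Prop
  | .node _ _ .nil => True
  | .node _ c (.cons p ts) => (pvLenN (HTreeList.cons p ts) : Int) ≤ c ∧ pvPartial p ∧ pvCompleteL ts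

-- "none-free": every cell of the segment is filled
def pvNF (l : List (Option String)) : Prop := ∀ x ∈ l, x ≠ none

theorem pvOfList_toList : ∀ ts : HTreeList, pvOfList (pvToList ts) = ts
  | .nil => rfl
  | .cons t ts => by simp [pvToList, pvOfList, pvOfList_toList ts]

theorem pvToList_ofList (l : List HTree) : pvToList (pvOfList l) = l := by
  induction l with
  | nil => rfl
  | cons t l ih => simp [pvOfList, pvToList, ih]

theorem pvLenN_toList : ∀ ts : HTreeList, (pvToList ts).length = pvLenN ts
  | .nil => rfl
  | .cons t ts => by simp [pvToList, pvLenN, pvLenN_toList ts]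

theorem pvLenN_ofList (l : List HTree) : pvLenN (pvOfList l) = l.length := by
  rw [← pvLenN_toList, pvToList_ofList]

theorem pvPostHL_toList : ∀ ts : HTreeList, (pvToList ts).flatMap pvPostH = pvPostHL ts
  | .nil => rfl
  | .cons t ts => by
      have := pvPostHL_toList ts
      simp [pvToList, pvPostHL] at this ⊢; simp [this]

theorem pvPostHL_ofList (l : List HTree) : pvPostHL (pvOfList l) = l.flatMap pvPostH := by
  rw [← pvPostHL_toList, pvToList_ofList]

theorem pvCompleteL_toList : ∀ ts : HTreeList, pvCompleteL ts → ∀ t ∈ pvToList ts, pvComplete t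
  | .nil, _ => by intro t ht; simp [pvToList] at ht
  | .cons t ts, h => by
      intro u hu
      rcases h with ⟨h1, h2⟩
      rcases (by simpa [pvToList] using hu : u = t ∨ u ∈ pvToList ts) with rfl | hu'
      · exact h1
      · exact pvCompleteL_toList ts h2 u hu'

theorem pvCompleteL_ofList (l : List HTree) (h : ∀ t ∈ l, pvComplete t) :
    pvCompleteL (pvOfList l) := by
  induction l with
  | nil => trivial
  | cons t l ih => exact ⟨h t (by simp), ih (fun u hu => h u (by simp [hu]))⟩

-- a complete tree is in particular partial
theorem pvComplete_partial : ∀ t : HTree, pvComplete t → pvPartial t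
  | .node v c .nil, _ => trivial
  | .node v c (.cons p ts), h => by
      rcases h with ⟨hc, hp, hts⟩
      exact ⟨hc.ge, pvComplete_partial p hp, hts⟩

mutual
theorem pvNF_emit : ∀ (t : HTree), pvComplete t → ∀ (d : Int), pvNF (pvEmit t d)
  | .node v c cs, ht, d => by
      rcases ht with ⟨hc, hcs⟩
      intro x hx
      rw [pvEmit] at hx
      rw [hc] at hx
      simp at hx
      rcases hx with h | h
      · simp [h, pvDots]
      · exact pvNF_emitL cs hcs (d + 1) x h
theorem pvNF_emitL : ∀ (ts : HTreeList), pvCompleteL ts → ∀ (d : Int), pvNF (pvEmitL ts d)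
  | .nil, _, _ => by intro x hx; simp [pvEmitL] at hx
  | .cons t ts, hts, d => by
      intro x hx
      simp [pvEmitL] at hx
      rcases hx with h | h
      · exact pvNF_emit t hts.1 d x h
      · exact pvNF_emitL ts hts.2 d x h
end

-- Python 'L[i] = x' on the open slot at position |X|
theorem pvSet_slot (X Y : List (Option String)) (x c : Option String) :
    pvSet (X ++ c :: Y) (X.length : Int) x = X ++ x :: Y := by
  simp only [pvSet]
  rw [if_neg (show ¬ ((X.length : Int) < 0) by omega)]
  rw [if_pos (⟨by omega, by simp⟩ : (0:Int) ≤ X.length ∧ (X.length:Int) < (X ++ c :: Y).length)]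
  have h1 : ((X.length : Int)).toNat = X.length := by omega
  rw [h1, List.set_append_right _ _ (le_refl _)]
  simp

-- the insert loop: c Nones are inserted right after position |X|, i ends at |X| + c
theorem pvInsertNones_slot (k : Nat) (X Y : List (Option String)) (c : Option String) :
    pvInsertNones (X ++ c :: Y) (X.length : Int) (k : Int)
      = (X ++ c :: (List.replicate k none ++ Y), (X.length : Int) + k) := by
  induction k with
  | zero => simp [pvInsertNones, PySem.List.pyRange]
  | succ k ih =>
      unfold pvInsertNones at ih ⊢
      rw [show ((k + 1 : Nat) : Int) = (k : Int) + 1 by push_cast; ring,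
          PySem.List.pyRange_one_succ_right (by omega), List.foldl_append, ih]
      simp only [List.foldl_cons, List.foldl_nil]
      have hpos : (X.length : Int) + k + 1 = ((X.length + k + 1 : Nat) : Int) := by push_cast; ring
      rw [hpos, PySem.List.insert_natCast _ _ _ (by simp)]
      have hsplit : X ++ c :: (List.replicate k none ++ Y)
          = (X ++ c :: List.replicate k none) ++ Y := by simp
      have hlen : (X ++ c :: List.replicate k none).length = X.length + k + 1 := by
        simp; omega
      rw [hsplit, List.take_left' hlen, List.drop_left' hlen]
      simp only [Prod.mk.injEq]
      exact ⟨by simp [List.replicate_succ'], by push_cast; ring⟩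

-- the backtracking walk: from the right end of the filled segment Z it steps left
-- to the nearest open slot (or to -1 when there is none)
theorem pvWalk_seg (Z : List (Option String)) (P R : List (Option String)) (d : Int)
    (hZ : pvNF Z) (hP : P = [] ∨ ∃ P', P = P' ++ [none]) :
    pvWalk (P ++ Z ++ R) ((P.length : Int) + Z.length - 1) d
      = ((P.length : Int) - 1, d - Z.length) := by
  induction Z using List.reverseRecOn generalizing R d with
  | nil =>
      rcases hP with rfl | ⟨P', rfl⟩
      · rw [pvWalk]; simp
      · rw [pvWalk]
        have hg : PySem.List.pyGet? ((P' ++ [none]) ++ [] ++ R) ((P'.length : Int)) = some none := by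
          have : (P' ++ [none]) ++ [] ++ R = P' ++ none :: R := by simp
          rw [this]; exact PySem.List.pyGet?_append_length _ _ _
        have hi : ((P' ++ [none]).length : Int) + ([] : List (Option String)).length - 1
            = (P'.length : Int) := by simp
        rw [hi, hg]
        simp
  | append_singleton Z' a ihZ =>
      have ha : a ≠ none := hZ a (by simp)
      have hZ' : pvNF Z' := fun x hx => hZ x (by simp [hx])
      have hg : PySem.List.pyGet? (P ++ (Z' ++ [a]) ++ R) ((P.length : Int) + Z'.length)
          = some a := by
        have h1 : P ++ (Z' ++ [a]) ++ R = (P ++ Z') ++ a :: R := by simp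
        have h2 : (P.length : Int) + Z'.length = (((P ++ Z').length : Nat) : Int) := by
          simp
        rw [h1, h2]; exact PySem.List.pyGet?_append_length _ _ _
      rw [pvWalk]
      have hi : (P.length : Int) + (Z' ++ [a]).length - 1 = (P.length : Int) + Z'.length := by
        simp; omega
      rw [hi]
      rw [dif_pos ⟨by omega, by rw [hg]; simp [ha]⟩]
      have h3 : P ++ (Z' ++ [a]) ++ R = P ++ Z' ++ ([a] ++ R) := by simp
      have := ihZ ([a] ++ R) (d - 1) hZ'
      rw [h3]
      calc pvWalk (P ++ Z' ++ ([a] ++ R)) ((P.length : Int) + ↑Z'.length - 1) (d - 1)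
          = ((P.length : Int) - 1, d - 1 - Z'.length) := this
        _ = ((P.length : Int) - 1, d - (Z' ++ [a]).length) := by
              have : ((Z' ++ [a]).length : Int) = Z'.length + 1 := by simp
              rw [this]; ring_nf

-- A's loop consumes the reversed postorder of a COMPLETE tree / forest, filling the open
-- slots right to left and backtracking to the next open slot
mutual
theorem pvALoop_tree : ∀ (t : HTree), pvComplete t → ∀ (rest : List (String × Int))
    (P Z Y : List (Option String)) (d : Int),
    pvNF Z → pvNF Y → (P = [] ∨ ∃ P', P = P' ++ [none]) →
    pvALoop ((pvPostH t).reverse ++ rest) (P ++ Z ++ none :: Y)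
        ((P.length : Int) + Z.length) d
      = pvALoop rest (P ++ Z ++ pvEmit t d ++ Y) ((P.length : Int) - 1) (d - Z.length)
  | .node v c cs, ht, rest, P, Z, Y, d, hZ, hY, hP => by
      obtain ⟨hc, hcs⟩ := ht
      subst hc
      have hrev : (pvPostH (.node v (pvLenN cs : Int) cs)).reverse ++ rest
          = (v, (pvLenN cs : Int)) :: ((pvPostHL cs).reverse ++ rest) := by
        simp [pvPostH]
      have hemit : pvEmit (.node v (pvLenN cs : Int) cs) d = pvDots d v :: pvEmitL cs (d + 1) := by
        rw [pvEmit]; simp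
      have hXL : P ++ Z ++ none :: Y = (P ++ Z) ++ none :: Y := by simp
      have hXi : (P.length : Int) + Z.length = (((P ++ Z).length : Nat) : Int) := by simp
      rw [hrev, hemit, hXL, hXi]
      simp only [pvALoop]
      rw [pvSet_slot, pvInsertNones_slot]
      cases cs with
      | nil =>
          simp only [pvLenN, Nat.cast_zero, beq_self_eq_true, if_true, List.replicate,
            List.nil_append, Int.add_zero]
          have hw : pvWalk ((P ++ Z) ++ pvDots d v :: Y) (((P ++ Z).length : Int) - 1) (d + 1 - 1)
              = ((P.length : Int) - 1, d - Z.length) := by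
            have h1 : (P ++ Z) ++ pvDots d v :: Y = P ++ Z ++ (pvDots d v :: Y) := by simp
            have h2 : (((P ++ Z).length : Nat) : Int) - 1 = (P.length : Int) + Z.length - 1 := by
              simp
            have h3 : d + 1 - 1 = d := by ring
            rw [h1, h2, h3, pvWalk_seg Z P _ d hZ hP]
          rw [hw]
          have h4 : (P ++ Z) ++ pvDots d v :: Y = P ++ Z ++ pvDots d v :: pvEmitL .nil (d + 1) ++ Y := by
            simp [pvEmitL]
          rw [h4]
          simp [pvPostHL]
      | cons t1 ts =>
          have hk : ¬ (((pvLenN (HTreeList.cons t1 ts) : Nat) : Int) == 0) = true := by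
            simp only [pvLenN, beq_iff_eq]
            omega
          rw [if_neg (by simpa using hk)]
          have hZ' : pvNF (Z ++ [pvDots d v]) := by
            intro x hx; rcases List.mem_append.1 hx with h | h
            · exact hZ x h
            · simp at h; simp [h, pvDots]
          have hL : (P ++ Z) ++ pvDots d v :: (List.replicate (pvLenN (HTreeList.cons t1 ts)) none ++ Y)
              = P ++ (Z ++ [pvDots d v]) ++ none :: (List.replicate (pvLenN ts) none ++ Y) := by
            simp [pvLenN, List.replicate_succ]
          have hI : (((P ++ Z).length : Nat) : Int) + ((pvLenN (HTreeList.cons t1 ts) : Nat) : Int)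
              = (P.length : Int) + (Z ++ [pvDots d v]).length + pvLenN ts := by
            simp [pvLenN]; ring
          rw [hL, hI, pvALoop_forest t1 ts hcs.1 hcs.2 rest P (Z ++ [pvDots d v]) Y (d + 1) hZ' hY hP]
          have hE : P ++ (Z ++ [pvDots d v]) ++ pvEmitL (.cons t1 ts) (d + 1) ++ Y
              = P ++ Z ++ pvDots d v :: pvEmitL (.cons t1 ts) (d + 1) ++ Y := by
            simp
          have hD : d + 1 - ((Z ++ [pvDots d v]).length : Int) = d - Z.length := by
            have : ((Z ++ [pvDots d v]).length : Int) = Z.length + 1 := by simp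
            omega
          rw [hE, hD]
  termination_by t => (sizeOf t, 0)

theorem pvALoop_forest : ∀ (t : HTree) (ts : HTreeList), pvComplete t → pvCompleteL ts →
    ∀ (rest : List (String × Int)) (P Z Y : List (Option String)) (d : Int),
    pvNF Z → pvNF Y → (P = [] ∨ ∃ P', P = P' ++ [none]) →
    pvALoop ((pvPostHL (.cons t ts)).reverse ++ rest)
        (P ++ Z ++ none :: (List.replicate (pvLenN ts) none ++ Y))
        ((P.length : Int) + Z.length + pvLenN ts) d
      = pvALoop rest (P ++ Z ++ pvEmitL (.cons t ts) d ++ Y) ((P.length : Int) - 1) (d - Z.length)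
  | t, ts, ht, hts, rest, P, Z, Y, d, hZ, hY, hP => by
      cases ts with
      | nil =>
          have h1 : (pvPostHL (.cons t .nil)).reverse ++ rest = (pvPostH t).reverse ++ rest := by
            simp [pvPostHL]
          have h2 : P ++ Z ++ none :: (List.replicate (pvLenN HTreeList.nil) none ++ Y)
              = P ++ Z ++ none :: Y := by simp [pvLenN]
          have h3 : (P.length : Int) + Z.length + ((pvLenN HTreeList.nil : Nat) : Int)
              = (P.length : Int) + Z.length := by simp [pvLenN]
          rw [h1, h2, h3, pvALoop_tree t ht rest P Z Y d hZ hY hP]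
          have h4 : P ++ Z ++ pvEmit t d ++ Y = P ++ Z ++ pvEmitL (.cons t .nil) d ++ Y := by
            simp [pvEmitL]
          rw [h4]
      | cons t2 ts2 =>
          have h1 : (pvPostHL (.cons t (.cons t2 ts2))).reverse ++ rest
              = (pvPostHL (.cons t2 ts2)).reverse ++ ((pvPostH t).reverse ++ rest) := by
            simp [pvPostHL]
          have hP' : (P ++ Z ++ [none]) = [] ∨ ∃ P', (P ++ Z ++ [none]) = P' ++ [none] :=
            Or.inr ⟨P ++ Z, by simp⟩
          have h2 : P ++ Z ++ none :: (List.replicate (pvLenN (HTreeList.cons t2 ts2)) none ++ Y)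
              = (P ++ Z ++ [none]) ++ ([] : List (Option String))
                  ++ none :: (List.replicate (pvLenN ts2) none ++ Y) := by
            simp [pvLenN, List.replicate_succ]
          have h3 : (P.length : Int) + Z.length + ((pvLenN (HTreeList.cons t2 ts2) : Nat) : Int)
              = ((P ++ Z ++ [none]).length : Int) + (([] : List (Option String)).length : Int)
                  + pvLenN ts2 := by
            simp [pvLenN]; ring
          have hZnil : pvNF ([] : List (Option String)) := by intro x hx; cases hx
          rw [h1, h2, h3,
            pvALoop_forest t2 ts2 hts.1 hts.2 ((pvPostH t).reverse ++ rest) (P ++ Z ++ [none]) [] Y d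
              hZnil hY hP']
          have h4 : (P ++ Z ++ [none]) ++ ([] : List (Option String))
                ++ pvEmitL (.cons t2 ts2) d ++ Y
              = P ++ Z ++ none :: (pvEmitL (.cons t2 ts2) d ++ Y) := by simp
          have h5 : ((P ++ Z ++ [none]).length : Int) - 1 = (P.length : Int) + Z.length := by
            have : ((P ++ Z ++ [none]).length : Int) = P.length + (Z.length + 1) := by
              simp
            omega
          have h6 : d - (([] : List (Option String)).length : Int) = d := by simp
          have hY' : pvNF (pvEmitL (.cons t2 ts2) d ++ Y) := by
            intro x hx; rcases List.mem_append.1 hx with h | h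
            · exact pvNF_emitL _ hts d x h
            · exact hY x h
          rw [h4, h5, h6, pvALoop_tree t ht rest P Z (pvEmitL (.cons t2 ts2) d ++ Y) d hZ hY' hP]
          have h7 : P ++ Z ++ pvEmit t d ++ (pvEmitL (.cons t2 ts2) d ++ Y)
              = P ++ Z ++ pvEmitL (.cons t (.cons t2 ts2)) d ++ Y := by
            simp [pvEmitL]
          rw [h7]
  termination_by t ts => (sizeOf t + sizeOf ts, 1)
end

-- A's loop on the reversed postorder of a PARTIAL tree: the stream ends with the tree,
-- never-supplied children stay None cells
theorem pvALoop_partial : ∀ (t : HTree), pvPartial t → ∀ (X Y : List (Option String)) (d : Int),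
    pvNF Y →
    pvALoop ((pvPostH t).reverse) (X ++ none :: Y) (X.length : Int) d
      = X ++ pvEmit t d ++ Y
  | .node v c .nil, ht, X, Y, d, hY => by
      have hrev : (pvPostH (.node v c .nil)).reverse = [(v, c)] := by
        simp [pvPostH, pvPostHL]
      by_cases hc : 0 ≤ c
      · obtain ⟨k, rfl⟩ : ∃ k : Nat, c = (k : Int) := ⟨c.toNat, by omega⟩
        rw [hrev]
        simp only [pvALoop]
        rw [pvSet_slot, pvInsertNones_slot]
        dsimp only
        cases h0 : (((k : Nat) : Int) == 0) <;>
          simp [pvEmit, pvEmitL, pvLenN]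
      · -- a negative declared count: Python's range is empty, no placeholder cells
        rw [hrev]
        simp only [pvALoop]
        rw [pvSet_slot]
        have hrange : PySem.List.pyRange 0 c = [] := by
          simp [PySem.List.pyRange]
          omega
        have hins : pvInsertNones (X ++ pvDots d v :: Y) (X.length : Int) c
            = (X ++ pvDots d v :: Y, (X.length : Int)) := by
          unfold pvInsertNones
          rw [hrange]
          rfl
        rw [hins]
        dsimp only
        cases h0 : (c == 0) <;> simp [pvEmit, pvEmitL, pvLenN] <;> omega
  | .node v c (.cons p ts), ht, X, Y, d, hY => by
      obtain ⟨hlen, hp, hts⟩ := ht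
      obtain ⟨k, rfl⟩ : ∃ k : Nat, c = (k : Int) :=
        ⟨c.toNat, (Int.toNat_of_nonneg (le_trans (Int.natCast_nonneg _) hlen)).symm⟩
      have hlenk : pvLenN ts + 1 ≤ k := by
        simp only [pvLenN] at hlen
        exact_mod_cast hlen
      -- hh = number of never-supplied children
      obtain ⟨hh, hksplit⟩ : ∃ hh : Nat, k = hh + 1 + pvLenN ts :=
        ⟨k - (pvLenN ts + 1), by omega⟩
      have hemit : pvEmit (.node v (k : Int) (.cons p ts)) d
          = pvDots d v :: (List.replicate hh none ++ (pvEmit p (d + 1) ++ pvEmitL ts (d + 1))) := by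
        rw [pvEmit]
        have h1 : (((k : Nat) : Int) - ((pvLenN (HTreeList.cons p ts) : Nat) : Int)).toNat = hh := by
          simp only [pvLenN]; omega
        rw [h1, pvEmitL]
      have hrev : (pvPostH (.node v (k : Int) (.cons p ts))).reverse
          = (v, (k : Int)) :: ((pvPostHL ts).reverse ++ (pvPostH p).reverse) := by
        simp [pvPostH, pvPostHL]
      rw [hrev]
      simp only [pvALoop]
      rw [pvSet_slot, pvInsertNones_slot]
      dsimp only
      have hc0 : ¬ (((k : Nat) : Int) == 0) = true := by
        simp only [beq_iff_eq]
        omega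
      rw [if_neg (by simpa using hc0)]
      cases ts with
      | nil =>
          -- only the partial head child is supplied; its slot is the last inserted None
          simp only [pvPostHL, List.reverse_nil, List.nil_append]
          have hrepl : List.replicate k (none : Option String) ++ Y
              = List.replicate hh none ++ none :: Y := by
            rw [show k = hh + 1 by simpa [pvLenN] using hksplit, List.replicate_succ']
            simp
          rw [hrepl]
          have hX' : X ++ pvDots d v :: (List.replicate hh none ++ none :: Y)
              = (X ++ pvDots d v :: List.replicate hh none) ++ none :: Y := by simp
          have hi : (X.length : Int) + ((k : Nat) : Int)
              = (((X ++ pvDots d v :: List.replicate hh none).length : Nat) : Int) := by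
            simp [pvLenN] at hksplit ⊢
            omega
          rw [hX', hi, pvALoop_partial p hp _ Y (d + 1) hY]
          rw [hemit]
          simp [pvEmitL]
      | cons t2 ts2 =>
          -- complete subtrees to the right first, then the partial head child
          have hrepl : List.replicate k (none : Option String) ++ Y
              = ((List.replicate hh none ++ [none]) ++ ([] : List (Option String)))
                  ++ none :: (List.replicate (pvLenN ts2) none ++ Y) := by
            rw [show k = (hh + 1) + (pvLenN ts2 + 1) by simpa [pvLenN] using hksplit,
              List.replicate_add, List.replicate_succ', List.replicate_succ]
            simp
          have hXfold : X ++ pvDots d v :: (((List.replicate hh none ++ [none]) ++ ([] : List (Option String)))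
                  ++ none :: (List.replicate (pvLenN ts2) none ++ Y))
              = (X ++ pvDots d v :: List.replicate hh none ++ [none]) ++ ([] : List (Option String))
                  ++ none :: (List.replicate (pvLenN ts2) none ++ Y) := by
            simp
          have hi : (X.length : Int) + ((k : Nat) : Int)
              = (((X ++ pvDots d v :: List.replicate hh none ++ [none]).length : Nat) : Int)
                  + ((([] : List (Option String)).length : Nat) : Int) + ((pvLenN ts2 : Nat) : Int) := by
            simp [pvLenN] at hksplit ⊢
            omega
          have hZnil : pvNF ([] : List (Option String)) := by intro x hx; cases hx
          have hP' : (X ++ pvDots d v :: List.replicate hh none ++ [none]) = [] ∨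
              ∃ P', (X ++ pvDots d v :: List.replicate hh none ++ [none]) = P' ++ [none] :=
            Or.inr ⟨X ++ pvDots d v :: List.replicate hh none, by simp⟩
          rw [hrepl, hXfold, hi,
            pvALoop_forest t2 ts2 hts.1 hts.2 ((pvPostH p).reverse)
              (X ++ pvDots d v :: List.replicate hh none ++ [none]) [] Y (d + 1) hZnil hY hP']
          have h4 : (X ++ pvDots d v :: List.replicate hh none ++ [none])
                ++ ([] : List (Option String)) ++ pvEmitL (.cons t2 ts2) (d + 1) ++ Y
              = (X ++ pvDots d v :: List.replicate hh none)
                  ++ none :: (pvEmitL (.cons t2 ts2) (d + 1) ++ Y) := by simp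
          have h5 : ((X ++ pvDots d v :: List.replicate hh none ++ [none]).length : Int) - 1
              = ((X ++ pvDots d v :: List.replicate hh none).length : Int) := by
            simp
            omega
          have h6 : d + 1 - ((([] : List (Option String)).length : Nat) : Int) = d + 1 := by simp
          have hY2 : pvNF (pvEmitL (.cons t2 ts2) (d + 1) ++ Y) := by
            intro x hx; rcases List.mem_append.1 hx with hx | hx
            · exact pvNF_emitL _ hts (d + 1) x hx
            · exact hY x hx
          rw [h4, h5, h6, pvALoop_partial p hp _ _ (d + 1) hY2]
          rw [hemit]
          simp [pvEmitL]
  termination_by t => sizeOf t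

-- B's step in closed form: keep the bottom of the stack, the top becomes the children
theorem pvBStep_eq (st : List HTree) (v : String) (c : Int) :
    pvBStep st (v, c)
      = st.take ((st.length : Int) - c).toNat
          ++ [HTree.node v c (pvOfList (st.drop ((st.length : Int) - c).toNat))] := by
  unfold pvBStep
  have hmax : max ((st.length : Int) - c) 0 = ((((st.length : Int) - c).toNat : Nat) : Int) :=
    (Int.toNat_eq_max _).symm
  dsimp only
  rw [hmax, PySem.List.slice_to_natCast, PySem.List.slice_from_natCast]

-- the stack invariant of B's pass: bottom element partial, the rest complete,
-- and the stack's flattened postorder is the consumed stream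
def pvInv : List HTree → Prop
  | [] => True
  | p :: rest => pvPartial p ∧ ∀ t ∈ rest, pvComplete t

theorem pvBStep_inv (st : List HTree) (v : String) (c : Int) (hc : 0 ≤ c) (h : pvInv st) :
    pvInv (pvBStep st (v, c)) ∧
      (pvBStep st (v, c)).flatMap pvPostH = st.flatMap pvPostH ++ [(v, c)] := by
  rw [pvBStep_eq]
  obtain ⟨m, hm⟩ : ∃ m : Nat, ((st.length : Int) - c).toNat = m := ⟨_, rfl⟩
  rw [hm]
  have hstream : (st.take m ++ [HTree.node v c (pvOfList (st.drop m))]).flatMap pvPostH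
      = st.flatMap pvPostH ++ [(v, c)] := by
    rw [List.flatMap_append]
    simp only [List.flatMap_cons, List.flatMap_nil, List.append_nil, pvPostH, pvPostHL_ofList]
    rw [← List.append_assoc, ← List.flatMap_append, List.take_append_drop]
  refine ⟨?_, hstream⟩
  cases m with
  | zero =>
      -- the entry claims the whole stack (possibly fewer children than declared)
      simp only [List.take_zero, List.drop_zero, List.nil_append]
      have hlen : (st.length : Int) ≤ c := by omega
      cases st with
      | nil =>
          exact ⟨trivial, by intro t ht; simp at ht⟩
      | cons p rest =>
          obtain ⟨hp, hrest⟩ := h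
          refine ⟨?_, by intro t ht; simp at ht⟩
          have hlen2 : (pvLenN (pvOfList (p :: rest)) : Int) ≤ c := by
            rw [pvLenN_ofList]; exact_mod_cast hlen
          have hof : pvOfList (p :: rest) = .cons p (pvOfList rest) := rfl
          show pvPartial (HTree.node v c (pvOfList (p :: rest)))
          rw [hof] at hlen2 ⊢
          exact ⟨hlen2, hp, pvCompleteL_ofList rest hrest⟩
  | succ m' =>
      -- no underflow: the entry claims exactly its declared children from the top
      have hmle : m' + 1 ≤ st.length := by omega
      cases st with
      | nil => simp at hmle
      | cons p rest =>
          obtain ⟨hp, hrest⟩ := h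
          simp only [List.length_cons] at hm
          have hmle' : m' ≤ rest.length := by simpa using hmle
          rw [List.take_succ_cons, List.drop_succ_cons]
          have hdropsub : rest.drop m' ⊆ rest := List.drop_subset _ _
          have hccount : c = (pvLenN (pvOfList (rest.drop m')) : Int) := by
            rw [pvLenN_ofList]
            have hdl : (rest.drop m').length = rest.length - m' := by simp
            rw [hdl]
            omega
          have hnode : pvComplete (HTree.node v c (pvOfList (rest.drop m'))) :=
            ⟨hccount, pvCompleteL_ofList _ (fun t ht => hrest t (hdropsub ht))⟩
          refine ⟨hp, ?_⟩
          intro t ht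
          rcases List.mem_append.1 ht with ht | ht
          · exact hrest t (List.take_subset _ _ ht)
          · rw [List.mem_singleton] at ht
            exact ht ▸ hnode

theorem pvFoldl_inv (l : List (String × Int)) (st : List HTree)
    (hc : ∀ p ∈ l, 0 ≤ p.2) (h : pvInv st) :
    pvInv (l.foldl pvBStep st) ∧
      (l.foldl pvBStep st).flatMap pvPostH = st.flatMap pvPostH ++ l := by
  induction l generalizing st with
  | nil => simpa using h
  | cons x l ih =>
      obtain ⟨v, c⟩ := x
      have hx := pvBStep_inv st v c (hc (v, c) (by simp)) h
      have := ih (pvBStep st (v, c)) (fun p hp => hc p (by simp [hp])) hx.1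
      refine ⟨this.1, ?_⟩
      rw [List.foldl_cons, this.2, hx.2]
      simp

theorem pvBStep_length (st : List HTree) (v : String) (c : Int) :
    ((pvBStep st (v, c)).length : Int) ≤ max ((st.length : Int) - c) 0 + 1 := by
  rw [pvBStep_eq]
  simp [List.length_take]
  omega

-- under the no-early-close condition the stack never grows past one element net
theorem pvFoldl_len_le (l : List (String × Int)) (st : List HTree)
    (h : ∀ j : Nat, j < l.length → pvOnes (l.drop j) ≤ 0)
    (hst : (st.length : Int) ≤ 1 - pvOnes l) :
    ((l.foldl pvBStep st).length : Int) ≤ 1 := by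
  induction l generalizing st with
  | nil => simpa [pvOnes] using hst
  | cons x l ih =>
      obtain ⟨v, c⟩ := x
      have hones : pvOnes ((v, c) :: l) = (1 - c) + pvOnes l := by simp [pvOnes]
      have hl0 : pvOnes l ≤ 0 := by
        cases l with
        | nil => simp [pvOnes]
        | cons y l' => simpa using h 1 (by simp)
      have hstep : ((pvBStep st (v, c)).length : Int) ≤ 1 - pvOnes l := by
        have hb := pvBStep_length st v c
        rw [hones] at hst
        omega
      exact ih (pvBStep st (v, c)) (fun j hj => by simpa using h (j + 1) (by simpa using hj))
        hstep

theorem pvFoldl_ne_nil (l : List (String × Int)) (st : List HTree) (h : l ≠ []) :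
    l.foldl pvBStep st ≠ [] := by
  induction l generalizing st with
  | nil => exact absurd rfl h
  | cons x l ih =>
      cases l with
      | nil =>
          obtain ⟨v, c⟩ := x
          rw [List.foldl_cons, List.foldl_nil, pvBStep_eq]
          apply List.ne_nil_of_length_pos
          simp
      | cons y l' =>
          rw [List.foldl_cons]
          exact ih _ (by simp)

-- B's first step on the empty stack: a single childless node, whatever the count
theorem pvBStep_nil (v : String) (c : Int) : pvBStep [] (v, c) = [HTree.node v c .nil] := by
  rw [pvBStep_eq]
  simp [pvOfList]

-- the structure theorem: on a Pre_ input, B's pass builds exactly one partial tree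
-- whose postorder is the input
theorem pvChar (AST : List (String × Int)) (hne : AST ≠ [])
    (hpre : Pre_Build_Preorder_Tree AST) :
    ∃ t : HTree, pvPartial t ∧ AST = pvPostH t ∧ AST.foldl pvBStep [] = [t] := by
  obtain ⟨hnn, hsuf⟩ := hpre
  obtain ⟨x, rest, rfl⟩ : ∃ x rest, AST = x :: rest := by
    cases AST with
    | nil => exact absurd rfl hne
    | cons x rest => exact ⟨x, rest, rfl⟩
  obtain ⟨v, c⟩ := x
  have hnn' : ∀ p ∈ rest, 0 ≤ p.2 := by
    intro p hp
    exact hnn p (by simpa using hp)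
  have hfold : ((v, c) :: rest).foldl pvBStep [] = rest.foldl pvBStep [HTree.node v c .nil] := by
    rw [List.foldl_cons, pvBStep_nil]
  have hlen : ((((v, c) :: rest).foldl pvBStep []).length : Int) ≤ 1 := by
    rw [hfold]
    refine pvFoldl_len_le rest _ ?_ ?_
    · intro j hj
      simpa using hsuf (j + 1) (by simpa using hj) (by omega)
    · cases rest with
      | nil => simp [pvOnes]
      | cons y rest' =>
          have := hsuf 1 (by simp) (by omega)
          simp at this ⊢
          omega
  have hinv1 : pvInv [HTree.node v c .nil] :=
    ⟨trivial, by intro t ht; simp at ht⟩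
  have hinv := pvFoldl_inv rest [HTree.node v c .nil] hnn' hinv1
  rw [← hfold] at hinv
  obtain ⟨t, hst⟩ : ∃ t, ((v, c) :: rest).foldl pvBStep [] = [t] := by
    cases hfe : ((v, c) :: rest).foldl pvBStep [] with
    | nil => exact absurd hfe (pvFoldl_ne_nil _ [] (by simp))
    | cons t rest' =>
        cases rest' with
        | nil => exact ⟨t, rfl⟩
        | cons u rest'' => rw [hfe] at hlen; simp at hlen; omega
  rw [hst] at hinv
  refine ⟨t, hinv.1.1, ?_, hst⟩
  have := hinv.2
  simp only [List.flatMap_cons, List.flatMap_nil, pvPostH, pvPostHL, List.nil_append,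
    List.append_nil] at this
  exact this.symm

-- ===== VERDICT (by name: the statement is the Claim_ definition above) =====
theorem Build_Preorder_Tree_spec : Claim_equal_Build_Preorder_Tree := by
  intro AST _ hpre
  unfold Spec_Build_Preorder_Tree
  cases hAST : AST with
  | nil => rfl
  | cons x rest => ?_
  rw [← hAST]
  have hne : AST ≠ [] := by rw [hAST]; simp
  obtain ⟨t, hpart, hpost, hfold⟩ := pvChar AST hne hpre
  have hA : Build_Preorder_Tree AST = pvEmit t 0 := by
    unfold Build_Preorder_Tree
    rw [hpost]
    have := pvALoop_partial t hpart [] [] 0 (by intro x hx; cases hx)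
    simpa using this
  have hB : Build_Preorder_Tree_alt AST = pvEmit t 0 := by
    unfold Build_Preorder_Tree_alt
    rw [hfold]
    simp
  rw [hA, hB]
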